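-- pv_equiv track=rewrite | github.com/ksayee/programming_assignments | python/CodingExercises/MissingPermutation.py | MissingPermutation
-- ===== SOURCE A (Python) =====
-- import collections
--
-- def Combinations_recur(lst,cnt,tmp,fnl_lst,permutation):
--
--     if len(tmp)==len(permutation[0]):
--         if ''.join(tmp) not in permutation:
--             fnl_lst.append(''.join(tmp))
--         return
--
--     for i in range(0,len(lst)):
--         if cnt[i]==0:
--             continue
--         tmp.append(lst[i])
--         cnt[i]=cnt[i]-1
--         Combinations_recur(lst, cnt, tmp, fnl_lst, permutation)
--         tmp.pop()
--         cnt[i]=cnt[i]+1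
--
-- def MissingPermutation(permutation):
--
--     dict=collections.Counter(permutation[0])
--     lst=[]
--     cnt=[]
--     for key,val in dict.items():
--         lst.append(key)
--         cnt.append(val)
--     tmp=[]
--     fnl_lst=[]
--     Combinations_recur(lst,cnt,tmp,fnl_lst,permutation)
--     return fnl_lst
-- ===== SOURCE B (Python) =====
-- import collections
--
-- def MissingPermutation(permutation):
--     counter = collections.Counter(permutation[0])
--     keys = list(counter)
--     partials = [("", tuple(counter.values()))]
--     for _ in range(len(permutation[0])):
--         partials = [(s + keys[i], rem[:i] + (rem[i] - 1,) + rem[i + 1:])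
--                     for s, rem in partials
--                     for i in range(len(keys)) if rem[i] > 0]
--     existing = set(permutation)
--     return [s for s, _ in partials if s not in existing]
-- ===== Notes on version B (the rewrite author's own statement) =====
-- stated objective: alternative
-- what changed: Replaced the recursive DFS backtracking (mutating tmp/cnt and an output accumulator) by an iterative level-by-level BFS that grows all partial strings one character per round and filters at the end; same first-appearance key order gives the same output order.
-- outside the precondition, e.g. on MissingPermutation([]): A raises IndexError, B raises IndexError
import Mathlib
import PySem

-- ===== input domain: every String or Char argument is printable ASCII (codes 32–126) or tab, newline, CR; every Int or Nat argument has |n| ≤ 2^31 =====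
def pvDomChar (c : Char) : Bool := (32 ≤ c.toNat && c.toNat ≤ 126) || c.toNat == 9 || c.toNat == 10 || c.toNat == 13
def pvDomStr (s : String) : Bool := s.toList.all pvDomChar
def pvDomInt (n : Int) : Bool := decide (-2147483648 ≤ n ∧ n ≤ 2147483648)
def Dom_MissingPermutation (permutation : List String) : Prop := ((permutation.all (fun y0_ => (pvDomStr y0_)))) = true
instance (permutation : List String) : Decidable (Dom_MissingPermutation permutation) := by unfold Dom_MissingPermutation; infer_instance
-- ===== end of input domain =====

-- B replaces A's recursive DFS backtracking by an iterative level-wise (BFS) generation of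
-- all distinct permutations in the same order; return values proved equal on nonempty input.

-- ===== PORT A =====
-- collections.Counter(s).items(): (char, count) pairs in first-appearance order (shared by both ports)
def pvCounter (s : List Char) : List (Char × Nat) :=
  s.foldl (fun acc c =>
    if acc.any (fun p => p.1 = c) then acc.map (fun p => if p.1 = c then (p.1, p.2 + 1) else p)
    else acc ++ [(c, 1)]) []

-- termination helper for the backtracking recursion (cnt[i] is decremented, so cnt.sum drops)
theorem pvSum_set (l : List Nat) (i : Nat) (v : Nat) (h : i < l.length) :
    (l.set i v).sum + l[i] = l.sum + v := by
  induction l generalizing i with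
  | nil => simp at h
  | cons a t ih =>
    cases i with
    | zero => simp [List.set]; omega
    | succ j =>
      have hj : j < t.length := by simpa using h
      have := ih j hj
      simp only [List.set, List.sum_cons, List.getElem_cons_succ]
      omega

-- Combinations_recur: recA is the function body, recALoop is its `for i in range(0,len(lst))` loop
mutual
def recA (perm : List String) (n : Nat) (lst : List Char) (cnt : List Nat)
    (tmp : List Char) (fnl : List String) : List String :=
  if tmp.length = n then
    (if String.mk tmp ∈ perm then fnl else fnl ++ [String.mk tmp])
  else
    recALoop perm n lst cnt tmp fnl 0
termination_by (cnt.sum, 1, 0)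
decreasing_by
  exact Prod.Lex.right _ (Prod.Lex.left _ _ (by omega))

def recALoop (perm : List String) (n : Nat) (lst : List Char) (cnt : List Nat)
    (tmp : List Char) (fnl : List String) (i : Nat) : List String :=
  if h : i < lst.length then
    if hz : cnt[i]! = 0 then
      recALoop perm n lst cnt tmp fnl (i + 1)
    else
      let fnl' := recA perm n lst (cnt.set i (cnt[i]! - 1)) (tmp ++ [lst[i]!]) fnl
      recALoop perm n lst cnt tmp fnl' (i + 1)
  else fnl
termination_by (cnt.sum, 0, lst.length - i)
decreasing_by
  · exact Prod.Lex.right _ (Prod.Lex.right _ (by omega))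
  · -- cnt[i]! ≠ 0 forces i < cnt.length (out-of-range getElem! is 0), so the sum strictly drops
    have hi : i < cnt.length := by
      by_contra hc
      exact hz (by simp [List.getElem!_eq_getElem?_getD, List.getElem?_eq_none (by omega : cnt.length ≤ i)])
    have he : cnt[i]! = cnt[i] := by
      simp [List.getElem!_eq_getElem?_getD, List.getElem?_eq_getElem hi]
    have := pvSum_set cnt i (cnt[i]! - 1) hi
    exact Prod.Lex.left _ _ (by omega)
  · exact Prod.Lex.right _ (Prod.Lex.right _ (by omega))
end

def MissingPermutation (permutation : List String) : List String :=
  match permutation with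
  | [] => []  -- unreachable under Pre_: Python raises IndexError on the empty list
  | p0 :: rest =>
    let items := pvCounter p0.toList
    recA (p0 :: rest) p0.toList.length (items.map Prod.fst) (items.map Prod.snd) [] []

-- ===== PORT B =====
-- one BFS round: extend every partial by every still-available key, in order
def altStep (keys : List Char) (ps : List (List Char × List Nat)) : List (List Char × List Nat) :=
  ps.flatMap (fun p =>
    (List.range keys.length).filterMap (fun i =>
      if 0 < p.2[i]! then some (p.1 ++ [keys[i]!], p.2.set i (p.2[i]! - 1)) else none))

def MissingPermutation_alt (permutation : List String) : List String :=
  match permutation with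
  | [] => []  -- unreachable under Pre_: Python raises IndexError on the empty list
  | p0 :: rest =>
    let items := pvCounter p0.toList
    let keys := items.map Prod.fst
    let partials := (List.range p0.toList.length).foldl
      (fun ps _ => altStep keys ps) [(([] : List Char), items.map Prod.snd)]
    partials.filterMap (fun p =>
      if String.mk p.1 ∈ (p0 :: rest) then none else some (String.mk p.1))

-- ===== PRECONDITION & SPEC =====
-- Pre_ excludes only the empty list, on which A raises IndexError (permutation[0]).
def Pre_MissingPermutation (permutation : List String) : Prop := permutation ≠ []
instance (permutation : List String) : Decidable (Pre_MissingPermutation permutation) := by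
  unfold Pre_MissingPermutation; infer_instance

def pvWitness_MissingPermutation : List String := ["ab", "ab"]

def Spec_MissingPermutation (permutation : List String) (out : List String) : Prop :=
  out = MissingPermutation_alt permutation
instance (permutation : List String) (out : List String) : Decidable (Spec_MissingPermutation permutation out) := by
  unfold Spec_MissingPermutation; infer_instance

-- ===== CLAIM (what is proved, stated in full; the proofs are below) =====
def Claim_equal_MissingPermutation : Prop := ∀ (permutation : List String), Dom_MissingPermutation permutation → Pre_MissingPermutation permutation → Spec_MissingPermutation permutation (MissingPermutation permutation)

-- ===== LEMMAS AND PROOFS =====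

-- iterate altStep k times
def iterN (keys : List Char) : Nat → List (List Char × List Nat) → List (List Char × List Nat)
  | 0, ps => ps
  | k + 1, ps => iterN keys k (altStep keys ps)

theorem iterN_altStep (keys : List Char) (k : Nat) (ps : List (List Char × List Nat)) :
    iterN keys k (altStep keys ps) = altStep keys (iterN keys k ps) := by
  induction k generalizing ps with
  | zero => rfl
  | succ k ih => simpa [iterN] using ih (altStep keys ps)

theorem foldl_range_iterN (keys : List Char) (n : Nat) (ps : List (List Char × List Nat)) :
    (List.range n).foldl (fun ps _ => altStep keys ps) ps = iterN keys n ps := by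
  induction n with
  | zero => rfl
  | succ n ih =>
    rw [List.range_succ, List.foldl_append, ih]
    simp [iterN, iterN_altStep]

theorem altStep_append (keys : List Char) (ps qs : List (List Char × List Nat)) :
    altStep keys (ps ++ qs) = altStep keys ps ++ altStep keys qs := by
  simp [altStep]

theorem iterN_append (keys : List Char) (k : Nat) (ps qs : List (List Char × List Nat)) :
    iterN keys k (ps ++ qs) = iterN keys k ps ++ iterN keys k qs := by
  induction k generalizing ps qs with
  | zero => rfl
  | succ k ih => simp [iterN, altStep_append, ih]

theorem iterN_nil (keys : List Char) (k : Nat) : iterN keys k [] = [] := by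
  induction k with
  | zero => rfl
  | succ k ih => simpa [iterN, altStep] using ih

-- final comprehension of B
def pvFin (perm : List String) (ps : List (List Char × List Nat)) : List String :=
  ps.filterMap (fun p => if String.mk p.1 ∈ perm then none else some (String.mk p.1))

theorem pvFin_append (perm : List String) (ps qs : List (List Char × List Nat)) :
    pvFin perm (ps ++ qs) = pvFin perm ps ++ pvFin perm qs := by
  simp [pvFin]

-- the candidates A's loop generates from index i onward
def stepFrom (lst : List Char) (cnt : List Nat) (tmp : List Char) (i : Nat) :
    List (List Char × List Nat) :=
  (List.range' i (lst.length - i)).filterMap (fun j =>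
    if 0 < cnt[j]! then some (tmp ++ [lst[j]!], cnt.set j (cnt[j]! - 1)) else none)

theorem altStep_single (lst : List Char) (cnt : List Nat) (tmp : List Char) :
    altStep lst [(tmp, cnt)] = stepFrom lst cnt tmp 0 := by
  simp [altStep, stepFrom, List.range_eq_range']

theorem recALoop_eq (perm : List String) (n : Nat) (lst : List Char) (k : Nat)
    (IH : ∀ (cnt : List Nat) (tmp : List Char) (fnl : List String), tmp.length + k = n →
      recA perm n lst cnt tmp fnl = fnl ++ pvFin perm (iterN lst k [(tmp, cnt)]))
    (cnt : List Nat) (tmp : List Char) (hlen : tmp.length + (k + 1) = n) :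
    ∀ (m i : Nat) (fnl : List String), i + m = lst.length →
      recALoop perm n lst cnt tmp fnl i = fnl ++ pvFin perm (iterN lst k (stepFrom lst cnt tmp i)) := by
  intro m
  induction m with
  | zero =>
    intro i fnl hi
    rw [recALoop.eq_def]
    simp [hi.symm, stepFrom, iterN_nil, pvFin]
  | succ m ih =>
    intro i fnl hi
    have hlt : i < lst.length := by omega
    have hrange : List.range' i (lst.length - i) = i :: List.range' (i + 1) (lst.length - (i + 1)) := by
      have h1 : lst.length - i = (lst.length - (i + 1)) + 1 := by omega
      rw [h1, List.range'_succ]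
    rw [recALoop.eq_def]
    simp only [hlt, dif_pos]
    by_cases hz : cnt[i]! = 0
    · rw [dif_pos hz, ih (i + 1) fnl (by omega)]
      have hc : ¬ 0 < cnt[i]?.getD 0 := by
        have hd : (default : Nat) = 0 := rfl
        simp only [List.getElem!_eq_getElem?_getD, hd] at hz; omega
      have : stepFrom lst cnt tmp i = stepFrom lst cnt tmp (i + 1) := by
        simp [stepFrom, hrange, hc]
      rw [this]
    · rw [dif_neg hz]
      have hrec := IH (cnt.set i (cnt[i]! - 1)) (tmp ++ [lst[i]!]) fnl (by simp; omega)
      rw [ih (i + 1) _ (by omega), hrec]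
      have hc : 0 < cnt[i]?.getD 0 := by
        have hd : (default : Nat) = 0 := rfl
        simp only [List.getElem!_eq_getElem?_getD, hd] at hz; omega
      have hstep : stepFrom lst cnt tmp i
          = (tmp ++ [lst[i]!], cnt.set i (cnt[i]! - 1)) :: stepFrom lst cnt tmp (i + 1) := by
        simp [stepFrom, hrange, hc, List.getElem!_eq_getElem?_getD]
      rw [hstep]
      have : ((tmp ++ [lst[i]!], cnt.set i (cnt[i]! - 1)) :: stepFrom lst cnt tmp (i + 1))
          = [(tmp ++ [lst[i]!], cnt.set i (cnt[i]! - 1))] ++ stepFrom lst cnt tmp (i + 1) := rfl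
      rw [this, iterN_append, pvFin_append, List.append_assoc]

theorem recA_eq (perm : List String) (n : Nat) (lst : List Char) (k : Nat) :
    ∀ (cnt : List Nat) (tmp : List Char) (fnl : List String), tmp.length + k = n →
      recA perm n lst cnt tmp fnl = fnl ++ pvFin perm (iterN lst k [(tmp, cnt)]) := by
  induction k with
  | zero =>
    intro cnt tmp fnl hlen
    rw [recA.eq_def]
    simp only [Nat.add_zero] at hlen
    simp [hlen, iterN, pvFin]
    by_cases h : String.mk tmp ∈ perm <;> simp [h]
  | succ k ih =>
    intro cnt tmp fnl hlen
    rw [recA, if_neg (by omega)]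
    rw [recALoop_eq perm n lst k ih cnt tmp hlen lst.length 0 fnl (by omega)]
    rw [show iterN lst (k + 1) [(tmp, cnt)] = iterN lst k (altStep lst [(tmp, cnt)]) from rfl,
      altStep_single]

-- ===== VERDICT (by name: the statement is the Claim_ definition above) =====
theorem MissingPermutation_spec : Claim_equal_MissingPermutation := by
  intro permutation _ hpre
  unfold Spec_MissingPermutation
  match permutation with
  | [] => exact absurd rfl hpre
  | p0 :: rest =>
    show recA _ _ _ _ _ _ = _
    rw [recA_eq (p0 :: rest) p0.toList.length ((pvCounter p0.toList).map Prod.fst)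
      p0.toList.length ((pvCounter p0.toList).map Prod.snd) [] [] (by simp)]
    simp only [MissingPermutation_alt, foldl_range_iterN, List.nil_append]
    rfl
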